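-- pv_equiv track=rewrite | github.com/riyanhax/Control_Venta_Jugos | taller_fundamentos/parcial_1.py | extraerimp
-- ===== SOURCE A (Python) =====
-- def extraerimp(num):
--     r = 0
--     i = 0
--     while num > 0:
--         quita = num % 10
--         num //= 10
--         if quita % 2 != 0 and i <= 1:
--             r = (r * 10) + quita
--             i = i + 1
--     return r
-- ===== SOURCE B (Python) =====
-- def extraerimp(num):
--     # gather all digits right-to-left, then combine the first two odd ones
--     digits = []
--     n = num
--     while n > 0:
--         digits.append(n % 10)
--         n //= 10
--     odds = [d for d in digits if d % 2 != 0]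
--     r = 0
--     for d in odds[:2]:
--         r = r * 10 + d
--     return r
-- ===== Notes on version B (the rewrite author's own statement) =====
-- stated objective: alternative
-- what changed: A interleaves digit extraction, parity test and a capped counter in one while loop; B gathers the digit list first, filters the odd digits, and folds just the first two of that list into the result.
import Mathlib
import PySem

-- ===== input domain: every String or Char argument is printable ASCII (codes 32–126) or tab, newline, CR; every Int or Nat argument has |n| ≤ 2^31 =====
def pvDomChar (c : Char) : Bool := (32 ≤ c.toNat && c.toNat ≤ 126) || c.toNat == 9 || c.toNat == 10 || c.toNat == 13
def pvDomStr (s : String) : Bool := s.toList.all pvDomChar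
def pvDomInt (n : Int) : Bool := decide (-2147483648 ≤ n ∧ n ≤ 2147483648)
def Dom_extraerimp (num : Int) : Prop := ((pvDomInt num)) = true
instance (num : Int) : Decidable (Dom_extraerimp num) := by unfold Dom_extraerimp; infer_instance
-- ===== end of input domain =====

-- B gathers the digits, filters the odd ones and folds the first two; A's single loop
-- interleaves extraction with a capped counter (alternative decomposition, same cost).

theorem pvFloordivTen_lt (n : Int) (h : 0 < n) :
    (PySem.Int.floordiv n 10).toNat < n.toNat := by
  rw [PySem.Int.floordiv_eq_ediv_of_pos (by omega)]
  omega

-- ===== PORT A =====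
def extraerimpLoop (num r i : Int) : Int :=
  if h : num > 0 then
    let quita := PySem.Int.mod num 10
    let num' := PySem.Int.floordiv num 10
    if PySem.Int.mod quita 2 ≠ 0 ∧ i ≤ 1 then
      extraerimpLoop num' (r * 10 + quita) (i + 1)
    else
      extraerimpLoop num' r i
  else r
termination_by num.toNat
decreasing_by all_goals exact pvFloordivTen_lt num h

def extraerimp (num : Int) : Int := extraerimpLoop num 0 0

-- ===== PORT B =====
def pvDigits (n : Int) : List Int :=
  if h : 0 < n then PySem.Int.mod n 10 :: pvDigits (PySem.Int.floordiv n 10) else []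
termination_by n.toNat
decreasing_by exact pvFloordivTen_lt n h

def extraerimp_alt (num : Int) : Int :=
  let digits := pvDigits num
  let odds := digits.filter (fun d => PySem.Int.mod d 2 ≠ 0)
  (odds.take 2).foldl (fun r d => r * 10 + d) 0

-- ===== PRECONDITION & SPEC =====
def Spec_extraerimp (num : Int) (out : Int) : Prop := out = extraerimp_alt num
instance (num : Int) (out : Int) : Decidable (Spec_extraerimp num out) := by unfold Spec_extraerimp; infer_instance

-- ===== CLAIM (what is proved, stated in full; the proofs are below) =====
def Claim_equal_extraerimp : Prop := ∀ (num : Int), Dom_extraerimp num → Spec_extraerimp num (extraerimp num)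

-- ===== LEMMAS AND PROOFS =====
theorem extraerimpLoop_eq (m : Nat) :
    ∀ n r i : Int, n.toNat ≤ m → 0 ≤ i →
    extraerimpLoop n r i =
      (((pvDigits n).filter (fun d => PySem.Int.mod d 2 ≠ 0)).take (2 - i.toNat)).foldl
        (fun r d => r * 10 + d) r := by
  induction m with
  | zero =>
    intro n r i hn hi
    have h0 : ¬ n > 0 := by omega
    rw [extraerimpLoop, pvDigits]
    simp [h0]
  | succ m ih =>
    intro n r i hn hi
    have hm10 : PySem.Int.mod n 10 = n % 10 := PySem.Int.mod_eq_emod_of_pos (by norm_num)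
    have hf10 : PySem.Int.floordiv n 10 = n / 10 := PySem.Int.floordiv_eq_ediv_of_pos (by norm_num)
    have hm2 : ∀ d : Int, PySem.Int.mod d 2 = d % 2 := fun d => PySem.Int.mod_eq_emod_of_pos (by norm_num)
    rw [extraerimpLoop, pvDigits]
    by_cases h : n > 0
    · have hlt := pvFloordivTen_lt n h
      simp only [h, dite_true, hm10, hf10, hm2]
      by_cases hodd : n % 10 % 2 ≠ 0
      · by_cases hi1 : i ≤ 1
        · rw [if_pos ⟨hodd, hi1⟩, ih _ _ _ (by omega) (by omega)]
          have htn : 2 - i.toNat = (2 - (i + 1).toNat) + 1 := by omega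
          have hodd' : n % 2 = 1 := by omega
          simp [htn, hodd']
        · rw [if_neg (fun hc => hi1 hc.2), ih _ _ _ (by omega) hi]
          have htn : 2 - i.toNat = 0 := by omega
          simp [htn]
      · rw [if_neg (fun hc => hodd hc.1), ih _ _ _ (by omega) hi]
        have hodd' : ¬ n % 2 = 1 := by omega
        simp [hodd']
    · simp [h]

-- ===== VERDICT (by name: the statement is the Claim_ definition above) =====
theorem extraerimp_spec : Claim_equal_extraerimp := by
  intro num _
  unfold Spec_extraerimp extraerimp extraerimp_alt
  rw [extraerimpLoop_eq num.toNat num 0 0 (le_refl _) (le_refl 0)]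
  norm_num
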